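-- pv_equiv track=rewrite | github.com/yuyye/airway_labeling | multitask_transformer.py | seg2lobor
-- ===== SOURCE A (Python) =====
-- def seg2lobor(y0):
--     y = y0.copy()
--     for j in range(len(y)):
--         if y[j] <= 3:
--             y[j] = 1
--         elif (y[j] > 3) & (y[j] <= 7):
--             y[j] = 2
--         elif (y[j] > 7) & (y[j] <= 10):
--             y[j] = 3
--         elif (y[j] > 10) & (y[j] <= 12):
--             y[j] = 4
--         elif (y[j] > 12) & (y[j] <= 17):
--             y[j] = 5
--         else:
--             y[j] = 0
--     return y
-- ===== SOURCE B (Python) =====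
-- import bisect
--
-- _BOUNDS = [3, 7, 10, 12, 17]
-- _MAPPING = [1, 2, 3, 4, 5, 0]
--
-- def seg2lobor(y0):
--     return [_MAPPING[bisect.bisect_left(_BOUNDS, v)] for v in y0]
-- ===== Notes on version B (the rewrite author's own statement) =====
-- stated objective: idiomatic
-- what changed: Replaces the in-place index loop with a chained if/elif ladder by a list comprehension doing a single bisect_left binary search into a sorted threshold table with a parallel bucket list.
import Mathlib
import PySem

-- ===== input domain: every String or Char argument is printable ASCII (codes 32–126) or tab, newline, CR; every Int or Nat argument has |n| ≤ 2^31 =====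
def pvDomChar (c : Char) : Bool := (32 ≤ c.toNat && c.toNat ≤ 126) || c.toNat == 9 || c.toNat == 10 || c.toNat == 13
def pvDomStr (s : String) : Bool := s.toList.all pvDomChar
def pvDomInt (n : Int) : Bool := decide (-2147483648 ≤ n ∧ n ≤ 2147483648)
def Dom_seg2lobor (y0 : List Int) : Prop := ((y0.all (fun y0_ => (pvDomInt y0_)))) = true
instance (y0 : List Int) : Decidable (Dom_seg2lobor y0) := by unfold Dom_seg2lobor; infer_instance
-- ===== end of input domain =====

-- B replaces the if/elif ladder with a bisect_left table lookup (idiomatic; same O(n) cost).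
-- ===== PORT A =====
-- per-element body of A's loop (the chained comparisons, in A's branch order)
def segBucket (v : Int) : Int :=
  if v ≤ 3 then 1
  else if v > 3 ∧ v ≤ 7 then 2
  else if v > 7 ∧ v ≤ 10 then 3
  else if v > 10 ∧ v ≤ 12 then 4
  else if v > 12 ∧ v ≤ 17 then 5
  else 0

def seg2lobor (y0 : List Int) : List Int := y0.map segBucket

-- ===== PORT B =====
-- bisect.bisect_left on a sorted list = length of the prefix of elements < v
def bisectLeft (xs : List Int) (v : Int) : Nat :=
  (xs.takeWhile (fun x => decide (x < v))).length

def segBounds : List Int := [3, 7, 10, 12, 17]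
def segMapping : List Int := [1, 2, 3, 4, 5, 0]

def seg2lobor_alt (y0 : List Int) : List Int :=
  y0.map (fun v => segMapping.getD (bisectLeft segBounds v) 0)

-- ===== PRECONDITION & SPEC =====
def Spec_seg2lobor (y0 : List Int) (out : List Int) : Prop := out = seg2lobor_alt y0
instance (y0 : List Int) (out : List Int) : Decidable (Spec_seg2lobor y0 out) := by unfold Spec_seg2lobor; infer_instance

-- ===== CLAIM (what is proved, stated in full; the proofs are below) =====
def Claim_equal_seg2lobor : Prop := ∀ (y0 : List Int), Dom_seg2lobor y0 → Spec_seg2lobor y0 (seg2lobor y0)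

-- ===== LEMMAS AND PROOFS =====

-- ===== VERDICT (by name: the statement is the Claim_ definition above) =====
-- the two per-element computations agree on every Int
theorem segBucket_eq (v : Int) :
    segBucket v = segMapping.getD (bisectLeft segBounds v) 0 := by
  unfold segBucket bisectLeft segBounds segMapping
  by_cases h1 : (3:Int) < v <;> by_cases h2 : (7:Int) < v <;>
    by_cases h3 : (10:Int) < v <;> by_cases h4 : (12:Int) < v <;>
      by_cases h5 : (17:Int) < v <;>
        simp [List.takeWhile, h1, h2, h3, h4, h5] <;> omega

theorem seg2lobor_spec : Claim_equal_seg2lobor := by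
  intro y0 _
  unfold Spec_seg2lobor seg2lobor seg2lobor_alt
  exact List.map_congr_left (fun v _ => segBucket_eq v)
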